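-- pv_equiv track=rewrite | github.com/HajianAmirhassan/Dm-Project | Project-2.py | split_binary
-- ===== SOURCE A (Python) =====
-- from typing import List, Set
--
-- def split_binary(s: str, max_len: int = 3) -> List[List[str]]:
--     n = len(s)
--     dp = [[] for _ in range(n + 1)]
--     dp[n] = [[]]
--     for i in range(n - 1, -1, -1):
--         for length in range(1, min(max_len + 1, n - i + 1)):
--             substring = s[i:i + length]
--             for rest in dp[i + length]:
--                 dp[i].append([substring] + rest)
--     return dp[0]
-- ===== SOURCE B (Python) =====
-- def split_binary(s: str, max_len: int = 3):
--     n = len(s)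
--
--     def split_from(i):
--         if i == n:
--             return [[]]
--         out = []
--         for length in range(1, min(max_len + 1, n - i + 1)):
--             prefix = s[i:i + length]
--             for rest in split_from(i + length):
--                 out.append([prefix] + rest)
--         return out
--
--     return split_from(0)
-- ===== Notes on version B (the rewrite author's own statement) =====
-- stated objective: simpler
-- what changed: Replaced the bottom-up DP table indexed by position with a direct top-down recursive helper split_from(i) that enumerates all splits of the suffix s[i:], keeping the same ascending-length order.
import Mathlib
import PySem

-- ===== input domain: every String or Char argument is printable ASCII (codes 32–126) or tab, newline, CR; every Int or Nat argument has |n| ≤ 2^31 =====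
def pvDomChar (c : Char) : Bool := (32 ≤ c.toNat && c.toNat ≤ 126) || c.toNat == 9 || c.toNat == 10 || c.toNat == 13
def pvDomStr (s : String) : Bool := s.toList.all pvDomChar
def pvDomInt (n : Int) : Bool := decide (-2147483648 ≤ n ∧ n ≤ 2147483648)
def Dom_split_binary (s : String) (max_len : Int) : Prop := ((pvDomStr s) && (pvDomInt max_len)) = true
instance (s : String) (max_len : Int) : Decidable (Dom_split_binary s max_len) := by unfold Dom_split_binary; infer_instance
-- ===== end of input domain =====

-- B replaces A's bottom-up DP table with a direct top-down recursion over the suffix,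
-- keeping the same ascending-length enumeration order (objective: simpler).

-- ===== PORT A =====
-- literal transliteration of A: dp table of size n+1, dp[n] = [[]], filled right-to-left;
-- every index used on dp is a nonnegative in-range table index of our own making, so .toNat is exact.
def split_binary (s : String) (max_len : Int) : List (List String) :=
  let cs := s.toList
  let n := cs.length
  let dp0 : List (List (List String)) :=
    ((List.range (n + 1)).map (fun _ => ([] : List (List String)))).set n [[]]
  let dp :=
    (PySem.List.pyRange ((n : Int) - 1) (-1) (-1)).foldl
      (fun dp i =>
        let entries :=
          (PySem.List.pyRange 1 (min (max_len + 1) ((n : Int) - i + 1)) 1).foldl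
            (fun acc length =>
              acc ++ (dp.getD (i + length).toNat []).map
                (fun rest => [String.ofList (PySem.List.slice cs (some i) (some (i + length)))] ++ rest))
            (dp.getD i.toNat [])
        dp.set i.toNat entries)
      dp0
  dp.getD 0 []

-- ===== PORT B =====
-- splitFrom cs max_len n rem = B's split_from (n - rem): all splits of the last rem characters.
def splitFrom (cs : List Char) (max_len : Int) (n : Nat) : Nat → List (List String)
  | 0 => [[]]
  | rem + 1 =>
    (List.range' 1 (min (max_len + 1) ((rem : Int) + 2) - 1).toNat).attach.flatMap
      (fun L =>
        (splitFrom cs max_len n (rem + 1 - L.1)).map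
          (fun rest => String.ofList ((cs.drop (n - (rem + 1))).take L.1) :: rest))
  termination_by rem => rem
  decreasing_by
    have h := (List.mem_range'_1.mp L.2).1
    omega

def split_binary_alt (s : String) (max_len : Int) : List (List String) :=
  let cs := s.toList
  splitFrom cs max_len cs.length cs.length

-- ===== PRECONDITION & SPEC =====
def Spec_split_binary (s : String) (max_len : Int) (out : List (List String)) : Prop := out = split_binary_alt s max_len
instance (s : String) (max_len : Int) (out : List (List String)) : Decidable (Spec_split_binary s max_len out) := by unfold Spec_split_binary; infer_instance

-- ===== CLAIM (what is proved, stated in full; the proofs are below) =====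
def Claim_equal_split_binary : Prop := ∀ (s : String) (max_len : Int), Dom_split_binary s max_len → Spec_split_binary s max_len (split_binary s max_len)

-- ===== LEMMAS AND PROOFS =====

-- A's loop body as a named function (proof helper only).
def stepA (cs : List Char) (max_len : Int) (dp : List (List (List String))) (i : Int) :
    List (List (List String)) :=
  dp.set i.toNat
    ((PySem.List.pyRange 1 (min (max_len + 1) ((cs.length : Int) - i + 1)) 1).foldl
      (fun acc length =>
        acc ++ (dp.getD (i + length).toNat []).map
          (fun rest => [String.ofList (PySem.List.slice cs (some i) (some (i + length)))] ++ rest))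
      (dp.getD i.toNat []))

-- strip the .attach (needed only for B's termination proof) off a flatMap
lemma flatMap_attach {a b : Type} (l : List a) (g : {x // x ∈ l} → List b) (f : a → List b)
    (h : ∀ x, g x = f x.1) : l.attach.flatMap g = l.flatMap f := by
  have : g = fun x => f x.1 := funext h
  subst this
  simp [List.flatMap]

-- The invariant table: dpAt k has [] below k and the B-value above.
def dpAt (cs : List Char) (max_len : Int) (k : Nat) : List (List (List String)) :=
  (List.range (cs.length + 1)).map
    (fun j => if j < k then ([] : List (List String)) else splitFrom cs max_len cs.length (cs.length - j))

lemma split_binary_eq_foldl (s : String) (max_len : Int) :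
    split_binary s max_len =
      ((PySem.List.pyRange ((s.toList.length : Int) - 1) (-1) (-1)).foldl
        (stepA s.toList max_len)
        (((List.range (s.toList.length + 1)).map (fun _ => ([] : List (List String)))).set
          s.toList.length [[]])).getD 0 [] := rfl

lemma getD_dpAt (cs : List Char) (max_len : Int) (k j : Nat) (hj : j ≤ cs.length) :
    (dpAt cs max_len k).getD j [] =
      if j < k then [] else splitFrom cs max_len cs.length (cs.length - j) := by
  unfold dpAt
  exact PySem.List.getD_map_range _ _ _ _ (by omega)

lemma dp0_eq (cs : List Char) (max_len : Int) :
    ((List.range (cs.length + 1)).map (fun _ => ([] : List (List String)))).set cs.length [[]] =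
      dpAt cs max_len cs.length := by
  unfold dpAt
  apply List.ext_getElem (by simp)
  intro j h1 h2
  simp only [List.getElem_set, List.getElem_map, List.getElem_range]
  simp only [List.length_map, List.length_range] at h2
  by_cases hj : j = cs.length
  · simp [hj, splitFrom]
  · rw [if_neg (fun h => hj h.symm), if_pos (by omega)]

lemma entries_eq (cs : List Char) (max_len : Int) (k : Nat) (hk : k < cs.length) :
    (PySem.List.pyRange 1 (min (max_len + 1) ((cs.length : Int) - (k : Int) + 1)) 1).foldl
      (fun acc length =>
        acc ++ ((dpAt cs max_len (k + 1)).getD ((k : Int) + length).toNat []).map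
          (fun rest => [String.ofList (PySem.List.slice cs (some (k : Int)) (some ((k : Int) + length)))] ++ rest))
      ((dpAt cs max_len (k + 1)).getD ((k : Int)).toNat []) =
      splitFrom cs max_len cs.length (cs.length - k) := by
  obtain ⟨r, hr⟩ : ∃ r, cs.length - k = r + 1 := ⟨cs.length - k - 1, by omega⟩
  have hrk : (r : Int) = (cs.length : Int) - (k : Int) - 1 := by omega
  -- left side: foldl-append over the range becomes a flatMap
  rw [Int.toNat_natCast, getD_dpAt cs max_len (k + 1) k (by omega), if_pos (by omega)]
  rw [PySem.List.pyRange_one, List.foldl_map, PySem.List.foldl_append_eq_flatMap]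
  -- right side: unfold splitFrom and strip attach
  rw [hr]
  rw [splitFrom]
  rw [flatMap_attach _ _
        (fun L => List.map
          (fun rest => String.ofList (List.take L (List.drop (cs.length - (r + 1)) cs)) :: rest)
          (splitFrom cs max_len cs.length (r + 1 - L)))
        (fun x => rfl)]
  rw [List.range'_eq_map_range, List.flatMap_map]
  rw [show (min (max_len + 1) ((r : Int) + 2) - 1).toNat
        = (min (max_len + 1) ((cs.length : Int) - (k : Int) + 1) - 1).toNat by
      rw [show (r : Int) + 2 = (cs.length : Int) - (k : Int) + 1 by omega]]
  rw [List.nil_append]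
  apply List.flatMap_congr
  intro y hy
  simp only [List.mem_range] at hy
  have hyb : y ≤ cs.length - k - 1 := by
    have h := min_le_right (max_len + 1) ((cs.length : Int) - (k : Int) + 1)
    omega
  rw [show (k : Int) + (1 + (y : Int)) = ((k : Nat) : Int) + ((1 + y : Nat) : Int) by push_cast; ring]
  rw [PySem.List.slice_natCast_add, Int.toNat_add (by omega) (by omega), Int.toNat_natCast,
      Int.toNat_natCast, getD_dpAt cs max_len (k + 1) (k + (1 + y)) (by omega),
      if_neg (by omega)]

  rw [show cs.length - (k + (1 + y)) = r + 1 - (1 + y) by omega,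
      show cs.length - (r + 1) = k by omega]
  simp only [List.singleton_append]

lemma stepA_dpAt (cs : List Char) (max_len : Int) (k : Nat) (hk : k < cs.length) :
    stepA cs max_len (dpAt cs max_len (k + 1)) (k : Int) = dpAt cs max_len k := by
  unfold stepA
  rw [entries_eq cs max_len k hk]
  simp only [Int.toNat_natCast]
  apply List.ext_getElem (by simp [dpAt])
  intro j h1 h2
  simp only [dpAt, List.length_map, List.length_range] at h2
  simp only [dpAt, List.getElem_set, List.getElem_map, List.getElem_range]
  by_cases hj : j = k
  · rw [if_pos (by omega), if_neg (by omega), hj]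
  · rw [if_neg (by omega)]
    by_cases hjk : j < k
    · rw [if_pos (by omega), if_pos (by omega)]
    · rw [if_neg (by omega), if_neg (by omega)]

lemma foldl_countdown (cs : List Char) (max_len : Int) (a : Nat) (ha : a < cs.length) :
    (PySem.List.pyRange (a : Int) (-1) (-1)).foldl (stepA cs max_len)
        (dpAt cs max_len (a + 1)) = dpAt cs max_len 0 := by
  induction a with
  | zero =>
    rw [PySem.List.pyRange_neg_one_cons (by norm_num), PySem.List.pyRange_neg_one_eq_nil (by norm_num)]
    simpa using stepA_dpAt cs max_len 0 ha
  | succ a ih =>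
    rw [show ((a + 1 : Nat) : Int) = (a : Int) + 1 by push_cast; ring,
        PySem.List.pyRange_neg_one_cons (by omega)]
    simp only [List.foldl_cons, add_sub_cancel_right]
    rw [show ((a : Int) + 1) = ((a + 1 : Nat) : Int) by push_cast; ring,
        stepA_dpAt cs max_len (a + 1) ha]
    exact ih (by omega)

-- ===== VERDICT (by name: the statement is the Claim_ definition above) =====
theorem split_binary_spec : Claim_equal_split_binary := by
  intro s max_len _
  unfold Spec_split_binary split_binary_alt
  rw [split_binary_eq_foldl, dp0_eq s.toList max_len]
  rcases Nat.eq_zero_or_pos s.toList.length with h0 | hpos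
  · rw [h0]
    rw [show ((0 : Nat) : Int) - 1 = -1 by norm_num, PySem.List.pyRange_neg_one_eq_nil (by norm_num)]
    simp only [List.foldl_nil]
    rw [getD_dpAt _ _ _ _ (by omega), h0]
    simp
  · obtain ⟨a, ha⟩ : ∃ a, s.toList.length = a + 1 := ⟨s.toList.length - 1, by omega⟩
    rw [show ((s.toList.length : Int) - 1) = (a : Int) by rw [ha]; push_cast; ring, ha]
    rw [foldl_countdown _ _ _ (by omega)]
    rw [getD_dpAt _ _ _ _ (by omega)]
    simp [ha]
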